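-- pv_equiv track=rewrite | github.com/sudiptap/algods | ds_algo/patterns/dynamic_programming/19_linear_dp/solutions/1714-sum-of-special-evenly-spaced-elements.py | solve
-- ===== SOURCE A (Python) =====
-- from typing import List
-- import math
--
-- MOD = 10**9 + 7
--
-- def solve(nums: List[int], queries: List[List[int]]) -> List[int]:
--     n = len(nums)
--     threshold = int(math.isqrt(n)) + 1
--
--     # Precompute suffix sums for small strides
--     # suffix[y][i] = nums[i] + nums[i+y] + nums[i+2y] + ... (mod MOD)
--     suffix = {}
--     for y in range(1, threshold + 1):
--         suf = [0] * (n + 1)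
--         for i in range(n - 1, -1, -1):
--             suf[i] = nums[i]
--             if i + y < n:
--                 suf[i] = (suf[i] + suf[i + y]) % MOD
--         suffix[y] = suf
--
--     result = []
--     for x, y in queries:
--         if y <= threshold:
--             result.append(suffix[y][x])
--         else:
--             # Large stride: just iterate
--             total = 0
--             i = x
--             while i < n:
--                 total = (total + nums[i]) % MOD
--                 i += y
--             result.append(total)
--
--     return result
-- ===== SOURCE B (Python) =====
-- from typing import List
--
-- MOD = 10**9 + 7
--
-- def solve(nums: List[int], queries: List[List[int]]) -> List[int]:
--     n = len(nums)
--     result = []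
--     for q in queries:
--         x, y = q[0], q[1]
--         total = 0
--         i = x
--         while i < n:
--             total = (total + nums[i]) % MOD
--             i += y
--         result.append(total)
--     return result
-- ===== Notes on version B (the rewrite author's own statement) =====
-- stated objective: simpler
-- what changed: Dropped the sqrt-threshold suffix-sum precompute and the small/large-stride split entirely; B answers every query with one direct stepped scan over nums.
-- intended difference: On small-stride queries (x,y) whose chain has exactly one element (n <= x+y) with nums[x] outside [0, MOD), A returns the raw unreduced nums[x] (its suffix table only applies % when combining two cells, unlike its own large-stride branch), while B returns nums[x] % MOD, the intended canonical modular sum. — e.g. on solve([-1], [[0, 1]]): A returns [-1], B returns [1000000006]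
-- outside the precondition, e.g. on solve([5, 6], [[-1, 1]]): A returns [0], B returns [17]
import Mathlib
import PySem

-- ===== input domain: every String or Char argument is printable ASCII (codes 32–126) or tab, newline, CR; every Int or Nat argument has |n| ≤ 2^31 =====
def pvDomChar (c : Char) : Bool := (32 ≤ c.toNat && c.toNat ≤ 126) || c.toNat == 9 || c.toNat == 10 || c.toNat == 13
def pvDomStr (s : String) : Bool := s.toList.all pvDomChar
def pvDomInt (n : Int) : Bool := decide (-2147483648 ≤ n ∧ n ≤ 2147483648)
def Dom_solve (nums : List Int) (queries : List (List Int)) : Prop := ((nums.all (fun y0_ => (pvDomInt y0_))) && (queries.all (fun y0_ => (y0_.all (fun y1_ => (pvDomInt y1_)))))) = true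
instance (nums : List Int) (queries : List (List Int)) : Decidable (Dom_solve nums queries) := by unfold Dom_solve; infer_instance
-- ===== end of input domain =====

-- B drops A's sqrt-threshold suffix-sum precompute and answers every query with one direct stepped scan (objective: simpler);
-- on single-element small-stride chains with nums[x] outside [0,MOD) A returns the raw value, B the canonical residue (see D_solve).


-- ===== PORT A =====
-- exact integer sqrt (= Python's math.isqrt): largest k ≤ n with k*k ≤ n; a foldl so the kernel can reduce it
def isqrt (n : Nat) : Nat := (List.range (n + 1)).foldl (fun a k => if k * k ≤ n then k else a) 0

-- A's large-stride while loop: `total = 0; i = x; while i < n: total = (total+nums[i]) % MOD; i += y`.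
-- Fuel (n-x).toNat bounds the iteration count whenever y ≥ 1 (Pre_); on y ≤ 0 the Python loop diverges (outside Pre_).
def aLoopAux (nums : List Int) (y : Int) : Nat → Int → Int → Int
  | 0, _, total => total
  | f + 1, i, total =>
    if i < (nums.length : Int) then
      aLoopAux nums y f (i + y) (PySem.Int.mod (total + PySem.List.pyGetD nums i 0) (1000000007 : Int))
    else total

def aLoop (nums : List Int) (x y : Int) : Int :=
  aLoopAux nums y ((nums.length : Int) - x).toNat x 0

-- one step of A's backward fill: `suf[i] = nums[i]; if i+y < n: suf[i] = (suf[i] + suf[i+y]) % MOD`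
def sufStep (nums : List Int) (y : Int) (suf : List Int) (i : Int) : List Int :=
  let v := PySem.List.pyGetD nums i 0
  let v := if i + y < (nums.length : Int) then PySem.Int.mod (v + PySem.List.pyGetD suf (i + y) 0) (1000000007 : Int) else v
  PySem.List.pySetD suf i v

-- `suf = [0]*(n+1); for i in range(n-1,-1,-1): …`
def buildSuf (nums : List Int) (y : Int) : List Int :=
  (PySem.List.pyRange ((nums.length : Int) - 1) (-1) (-1)).foldl (sufStep nums y) (List.replicate (nums.length + 1) 0)

def solve (nums : List Int) (queries : List (List Int)) : List Int :=
  let threshold : Int := (isqrt nums.length : Int) + 1   -- int(math.isqrt(n)) + 1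
  let suffix : PySem.Dict Int (List Int) :=
    (PySem.List.pyRange 1 (threshold + 1) 1).foldl (fun d y => d.insert y (buildSuf nums y)) PySem.Dict.empty
  queries.foldl (fun result q =>
    match q with
    | [x, y] =>
      if y ≤ threshold then
        -- suffix[y][x]; a KeyError/IndexError here is excluded by Pre_ (getD/pyGetD are the total forms)
        result ++ [PySem.List.pyGetD (PySem.Dict.getD suffix y []) x 0]
      else
        result ++ [aLoop nums x y]
    | _ => result)   -- `for x, y in queries` raises ValueError on a non-pair: excluded by Pre_
    []

-- ===== PORT B =====
-- B's per-query scan: `total = 0; i = x; while i < n: total = (total+nums[i]) % MOD; i += y` (same fuel note as aLoopAux).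
def bLoopAux (nums : List Int) (y : Int) : Nat → Int → Int → Int
  | 0, _, total => total
  | f + 1, i, total =>
    if i < (nums.length : Int) then
      bLoopAux nums y f (i + y) (PySem.Int.mod (total + PySem.List.pyGetD nums i 0) (1000000007 : Int))
    else total

def bLoop (nums : List Int) (x y : Int) : Int :=
  bLoopAux nums y ((nums.length : Int) - x).toNat x 0

def solve_alt (nums : List Int) (queries : List (List Int)) : List Int :=
  queries.map (fun q =>
    -- `for x, y in queries`: take q[0], q[1]; a non-pair query raises ValueError in Python (excluded by Pre_)
    if q.length = 2 then bLoop nums (q.getD 0 0) (q.getD 1 0) else 0)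

-- ===== PRECONDITION & SPEC =====

-- Pre_ excludes inputs where A raises (queries not of length 2: ValueError; y ≤ 0: KeyError or an infinite loop;
-- small-stride x outside [0,n]: IndexError; large-stride x < -n: IndexError) and, for small strides, negative x,
-- on which A returns an accidental Python-wraparound read of its suffix table while B wraps around nums itself —
-- both values are artefacts of negative indexing, neither is a specified sum.
def Pre_solve (nums : List Int) (queries : List (List Int)) : Prop :=
  ∀ q ∈ queries, q.length = 2 ∧ 1 ≤ q.getD 1 0 ∧
    ((q.getD 1 0 - 1) * (q.getD 1 0 - 1) ≤ (nums.length : Int) → 0 ≤ q.getD 0 0 ∧ q.getD 0 0 ≤ (nums.length : Int)) ∧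
    ((nums.length : Int) < (q.getD 1 0 - 1) * (q.getD 1 0 - 1) → -(nums.length : Int) ≤ q.getD 0 0)
instance (nums : List Int) (queries : List (List Int)) : Decidable (Pre_solve nums queries) := by unfold Pre_solve; infer_instance

def pvWitness_solve : List Int × List (List Int) := ([1, 2, 3], [[0, 1], [1, 2], [0, 3]])

-- On small-stride queries (x,y) whose chain has exactly one element (n ≤ x+y) with nums[x] outside [0,MOD),
-- A returns raw nums[x] (its table applies % only when combining two cells, unlike its own large-stride branch),
-- while B returns nums[x] % MOD, the intended canonical modular sum.
def D_solve (nums : List Int) (queries : List (List Int)) : Prop :=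
  ∃ q ∈ queries,
    let y := q.getD 1 0
    let v := nums.getD (q.headD 0).toNat 0
    (y - 1) * (y - 1) ≤ nums.length ∧ nums.length ≤ q.headD 0 + y ∧ v % 1000000007 ≠ v
instance (nums : List Int) (queries : List (List Int)) : Decidable (D_solve nums queries) := by unfold D_solve; infer_instance

def Spec_solve (nums : List Int) (queries : List (List Int)) (out : List Int) : Prop :=
  ¬ D_solve nums queries → out = solve_alt nums queries
instance (nums : List Int) (queries : List (List Int)) (out : List Int) : Decidable (Spec_solve nums queries out) := by unfold Spec_solve; infer_instance

def pvDiffWitness_solve : List Int × List (List Int) := ([-1], [[0, 1]])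
def pvDiffWitnessOut_solve : (List Int) × (List Int) := ([-1], [1000000006])

-- ===== CLAIM (what is proved, stated in full; the proofs are below) =====
def Claim_unchanged_solve : Prop := ∀ (nums : List Int) (queries : List (List Int)), Dom_solve nums queries → Pre_solve nums queries → Spec_solve nums queries (solve nums queries)
def Claim_exact_solve : Prop := ∀ (nums : List Int) (queries : List (List Int)), Dom_solve nums queries → Pre_solve nums queries → D_solve nums queries → solve nums queries ≠ solve_alt nums queries
def Claim_changed_solve : Prop := Dom_solve (pvDiffWitness_solve.1) (pvDiffWitness_solve.2) ∧ Pre_solve (pvDiffWitness_solve.1) (pvDiffWitness_solve.2) ∧ D_solve (pvDiffWitness_solve.1) (pvDiffWitness_solve.2) ∧ solve (pvDiffWitness_solve.1) (pvDiffWitness_solve.2) = pvDiffWitnessOut_solve.1 ∧ solve_alt (pvDiffWitness_solve.1) (pvDiffWitness_solve.2) = pvDiffWitnessOut_solve.2 ∧ pvDiffWitnessOut_solve.1 ≠ pvDiffWitnessOut_solve.2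

-- ===== LEMMAS AND PROOFS =====

-- isqrt n is the largest k with k*k ≤ n (so, for 1 ≤ y: y ≤ isqrt n + 1 ↔ (y-1)² ≤ n)
theorem isqrt_spec (n : Nat) : isqrt n * isqrt n ≤ n ∧ ∀ k, k * k ≤ n → k ≤ isqrt n := by
  have main : ∀ (m : Nat),
      ((List.range m).foldl (fun a k => if k * k ≤ n then k else a) 0) *
        ((List.range m).foldl (fun a k => if k * k ≤ n then k else a) 0) ≤ n ∧
      ∀ k, k < m → k * k ≤ n → k ≤ (List.range m).foldl (fun a k => if k * k ≤ n then k else a) 0 := by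
    intro m
    induction m with
    | zero => exact ⟨Nat.zero_le n, fun k hk => absurd hk (Nat.not_lt_zero k)⟩
    | succ m ih =>
      obtain ⟨h1, h2⟩ := ih
      rw [List.range_succ, List.foldl_append, List.foldl_cons, List.foldl_nil]
      by_cases hm : m * m ≤ n
      · rw [if_pos hm]
        exact ⟨hm, fun k hk _ => by omega⟩
      · rw [if_neg hm]
        refine ⟨h1, fun k hk hkn => ?_⟩
        have : k ≠ m := fun h => hm (h ▸ hkn)
        exact h2 k (by omega) hkn
  obtain ⟨h1, h2⟩ := main (n + 1)
  refine ⟨h1, fun k hk => ?_⟩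
  have hkn : k < n + 1 := by nlinarith
  exact h2 k hkn hk

theorem strideSmall_iff (n : Nat) (y : Int) (hy : 1 ≤ y) :
    y ≤ (isqrt n : Int) + 1 ↔ (y - 1) * (y - 1) ≤ (n : Int) := by
  obtain ⟨h1, h2⟩ := isqrt_spec n
  have hm : (((y - 1).toNat : Int)) = y - 1 := by omega
  constructor
  · intro h
    have hmn : (y - 1).toNat ≤ isqrt n := by omega
    have : (y - 1).toNat * (y - 1).toNat ≤ n := le_trans (Nat.mul_le_mul hmn hmn) h1
    calc (y - 1) * (y - 1) = (((y - 1).toNat * (y - 1).toNat : Nat) : Int) := by push_cast [hm]; ring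
      _ ≤ (n : Int) := by exact_mod_cast this
  · intro h
    have : ((( (y - 1).toNat * (y - 1).toNat : Nat)) : Int) ≤ (n : Int) := by
      calc (((y - 1).toNat * (y - 1).toNat : Nat) : Int) = (y - 1) * (y - 1) := by push_cast [hm]; ring
        _ ≤ (n : Int) := h
    have := h2 ((y - 1).toNat) (by exact_mod_cast this)
    omega

theorem loops_eq (nums : List Int) (y : Int) : ∀ (f : Nat) (i t : Int), aLoopAux nums y f i t = bLoopAux nums y f i t := by
  intro f
  induction f with
  | zero => intro i t; rfl
  | succ f ih => intro i t; simp only [aLoopAux, bLoopAux, ih]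

-- the value A's backward fill stores at cell i (fuel-indexed)
def entry (nums : List Int) (y : Int) : Nat → Int → Int
  | 0, _ => 0
  | f + 1, i =>
    if i < (nums.length : Int) then
      (if i + y < (nums.length : Int) then
        PySem.Int.mod (PySem.List.pyGetD nums i 0 + entry nums y f (i + y)) (1000000007 : Int)
      else PySem.List.pyGetD nums i 0)
    else 0

def entryC (nums : List Int) (y i : Int) : Int := entry nums y ((nums.length : Int) - i).toNat i

theorem entry_fuel (nums : List Int) (y : Int) (hy : 1 ≤ y) :
    ∀ (f g : Nat) (i : Int), ((nums.length : Int) - i).toNat ≤ f → ((nums.length : Int) - i).toNat ≤ g →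
      entry nums y f i = entry nums y g i := by
  intro f
  induction f with
  | zero =>
    intro g i hf hg
    have hi : (nums.length : Int) ≤ i := by omega
    cases g with
    | zero => rfl
    | succ g => simp [entry, not_lt.mpr hi]
  | succ f ih =>
    intro g i hf hg
    cases g with
    | zero =>
      have hi : (nums.length : Int) ≤ i := by omega
      simp [entry, not_lt.mpr hi]
    | succ g =>
      by_cases hi : i < (nums.length : Int)
      · have hb : ((nums.length : Int) - (i + y)).toNat ≤ f := by omega
        have hb' : ((nums.length : Int) - (i + y)).toNat ≤ g := by omega
        simp only [entry, hi, if_true, ih g (i + y) hb hb']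
      · simp [entry, hi]

theorem entryC_unfold (nums : List Int) (y : Int) (hy : 1 ≤ y) (i : Int) :
    entryC nums y i =
      if i < (nums.length : Int) then
        (if i + y < (nums.length : Int) then
          PySem.Int.mod (PySem.List.pyGetD nums i 0 + entryC nums y (i + y)) (1000000007 : Int)
        else PySem.List.pyGetD nums i 0)
      else 0 := by
  by_cases hi : i < (nums.length : Int)
  · have h1 : ((nums.length : Int) - i).toNat = ((nums.length : Int) - i - 1).toNat + 1 := by omega
    have h2 : ((nums.length : Int) - (i + y)).toNat ≤ ((nums.length : Int) - i - 1).toNat := by omega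
    unfold entryC
    rw [h1]
    simp only [entry, hi, if_true]
    rw [entry_fuel nums y hy _ (((nums.length : Int) - (i + y)).toNat) (i + y) h2 le_rfl]
  · have h1 : ((nums.length : Int) - i).toNat = 0 := by omega
    unfold entryC
    rw [h1]
    simp [entry, hi]

theorem buildSuf_spec (nums : List Int) (y : Int) (hy : 1 ≤ y) :
    (buildSuf nums y).length = nums.length + 1 ∧
    ∀ j : Nat, j ≤ nums.length → (buildSuf nums y).getD j 0 = entryC nums y (j : Int) := by
  have main : ∀ (k : Nat), k ≤ nums.length → ∀ (suf : List Int), suf.length = nums.length + 1 →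
      (∀ j : Nat, k ≤ j → j ≤ nums.length → suf.getD j 0 = entryC nums y (j : Int)) →
      ((PySem.List.pyRange ((k : Int) - 1) (-1) (-1)).foldl (sufStep nums y) suf).length = nums.length + 1 ∧
      ∀ j : Nat, j ≤ nums.length →
        ((PySem.List.pyRange ((k : Int) - 1) (-1) (-1)).foldl (sufStep nums y) suf).getD j 0 = entryC nums y (j : Int) := by
    intro k
    induction k with
    | zero =>
      intro _ suf hlen hinv
      rw [PySem.List.pyRange_neg_one_eq_nil (by omega)]
      exact ⟨hlen, fun j hj => hinv j (Nat.zero_le j) hj⟩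
    | succ k ih =>
      intro hk suf hlen hinv
      have hkn : (k : Int) < (nums.length : Int) := by omega
      have hstep : PySem.List.pyRange (((k + 1 : Nat) : Int) - 1) (-1) (-1) = (k : Int) :: PySem.List.pyRange ((k : Int) - 1) (-1) (-1) := by
        have hc : ((k + 1 : Nat) : Int) - 1 = (k : Int) := by push_cast; ring
        rw [hc]
        exact PySem.List.pyRange_neg_one_cons (by omega)
      have hset : sufStep nums y suf (k : Int) = suf.set k
          (if (k : Int) + y < (nums.length : Int) then
            PySem.Int.mod (PySem.List.pyGetD nums (k : Int) 0 + PySem.List.pyGetD suf ((k : Int) + y) 0) (1000000007 : Int)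
          else PySem.List.pyGetD nums (k : Int) 0) := by
        simp [sufStep]
      have hlen1 : (sufStep nums y suf (k : Int)).length = nums.length + 1 := by
        rw [hset, List.length_set, hlen]
      have hinv1 : ∀ j : Nat, k ≤ j → j ≤ nums.length → (sufStep nums y suf (k : Int)).getD j 0 = entryC nums y (j : Int) := by
        intro j hkj hjn
        rw [hset]
        by_cases hjk : j = k
        · subst hjk
          have hjlt : j < suf.length := by omega
          rw [List.getD_eq_getElem?_getD, List.getElem?_set_self hjlt, Option.getD_some]
          rw [entryC_unfold nums y hy (j : Int)]
          have hjn' : (j : Int) < (nums.length : Int) := by omega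
          simp only [hjn', if_true]
          by_cases hjy : (j : Int) + y < (nums.length : Int)
          · simp only [hjy, if_true]
            have h0 : (0 : Int) ≤ (j : Int) + y := by omega
            have hlt : (j : Int) + y < (suf.length : Int) := by omega
            have : PySem.List.pyGetD suf ((j : Int) + y) 0 = entryC nums y ((j : Int) + y) := by
              rw [PySem.List.pyGetD_eq_getElem suf 0 h0 hlt]
              have hji : (((j : Int) + y).toNat : Int) = (j : Int) + y := by omega
              have := hinv (((j : Int) + y).toNat) (by omega) (by omega)
              rw [List.getD_eq_getElem?_getD, List.getElem?_eq_getElem (by omega), Option.getD_some] at this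
              rw [this, hji]
            rw [this]
          · simp only [hjy, if_false]
        · rw [List.getD_eq_getElem?_getD, List.getElem?_set_ne (by omega), ← List.getD_eq_getElem?_getD]
          exact hinv j (by omega) hjn
      have := ih (by omega) (sufStep nums y suf (k : Int)) hlen1 hinv1
      rw [hstep, List.foldl_cons]
      exact this
  have hrep : ∀ j : Nat, nums.length ≤ j → j ≤ nums.length → (List.replicate (nums.length + 1) (0 : Int)).getD j 0 = entryC nums y (j : Int) := by
    intro j h1 h2
    have hj : j = nums.length := by omega
    subst hj
    rw [entryC_unfold nums y hy]
    simp
  have := main nums.length le_rfl (List.replicate (nums.length + 1) 0) (by simp) hrep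
  unfold buildSuf
  exact this

theorem bLoopAux_spec (nums : List Int) (y : Int) (hy : 1 ≤ y) :
    ∀ (f : Nat) (i t : Int), ((nums.length : Int) - i).toNat ≤ f →
      bLoopAux nums y f i t = if i < (nums.length : Int) then PySem.Int.mod (t + entryC nums y i) (1000000007 : Int) else t := by
  intro f
  induction f with
  | zero =>
    intro i t hf
    have hi : (nums.length : Int) ≤ i := by omega
    simp [bLoopAux, not_lt.mpr hi]
  | succ f ih =>
    intro i t hf
    by_cases hi : i < (nums.length : Int)
    · simp only [bLoopAux, hi, if_true]
      rw [ih (i + y) _ (by omega)]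
      rw [entryC_unfold nums y hy i]
      simp only [hi, if_true]
      by_cases hiy : i + y < (nums.length : Int)
      · simp only [hiy, if_true]
        simp only [PySem.Int.mod_eq_emod_of_pos (show (0 : Int) < (1000000007 : Int) by norm_num)]
        omega
      · simp only [hiy, if_false]
    · simp [bLoopAux, hi]

theorem dict_fold_getD (nums : List Int) :
    ∀ (ys : List Int) (d : PySem.Dict Int (List Int)) (z : Int),
      (ys.foldl (fun d y => d.insert y (buildSuf nums y)) d).getD z [] =
        if z ∈ ys then buildSuf nums z else d.getD z [] := by
  intro ys
  induction ys with
  | nil => intro d z; simp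
  | cons w ys ih =>
    intro d z
    rw [List.foldl_cons, ih]
    by_cases hz : z ∈ ys
    · simp [hz]
    · simp only [hz, if_false]
      rw [PySem.Dict.getD_insert]
      by_cases hzw : z = w
      · subst hzw; simp
      · simp [List.mem_cons, hz, hzw]

theorem smallQuery (nums : List Int) (x y : Int) (hy : 1 ≤ y) (hx0 : 0 ≤ x) (hxn : x ≤ (nums.length : Int))
    (hok : (nums.length : Int) ≤ x + y → x < (nums.length : Int) →
           0 ≤ nums.getD x.toNat 0 ∧ nums.getD x.toNat 0 < 1000000007) :
    PySem.List.pyGetD (buildSuf nums y) x 0 = bLoop nums x y := by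
  obtain ⟨hblen, hbval⟩ := buildSuf_spec nums y hy
  have hxlt : x < ((buildSuf nums y).length : Int) := by omega
  rw [PySem.List.pyGetD_eq_getElem (buildSuf nums y) 0 hx0 hxlt]
  have hx' : (x.toNat : Int) = x := by omega
  have hv : (buildSuf nums y)[x.toNat] = entryC nums y x := by
    have h := hbval x.toNat (by omega)
    rw [List.getD_eq_getElem?_getD, List.getElem?_eq_getElem (by omega), Option.getD_some] at h
    rw [h, hx']
  rw [hv]
  unfold bLoop
  rw [bLoopAux_spec nums y hy _ x 0 le_rfl]
  by_cases hxlt2 : x < (nums.length : Int)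
  · simp only [hxlt2, if_true]
    rw [entryC_unfold nums y hy x]
    simp only [hxlt2, if_true]
    by_cases hxy : x + y < (nums.length : Int)
    · simp only [hxy, if_true]
      simp only [PySem.Int.mod_eq_emod_of_pos (show (0 : Int) < (1000000007 : Int) by norm_num)]
      omega
    · simp only [hxy, if_false]
      have hb := hok (by omega) hxlt2
      have hng : PySem.List.pyGetD nums x 0 = nums.getD x.toNat 0 := by
        rw [PySem.List.pyGetD_eq_getElem nums 0 hx0 hxlt2, List.getD_eq_getElem?_getD,
          List.getElem?_eq_getElem (by omega), Option.getD_some]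
      rw [hng]
      simp only [PySem.Int.mod_eq_emod_of_pos (show (0 : Int) < (1000000007 : Int) by norm_num)]
      omega
  · simp only [hxlt2, if_false]
    rw [entryC_unfold nums y hy x]
    simp [hxlt2]

theorem aLoop_eq_bLoop (nums : List Int) (x y : Int) : aLoop nums x y = bLoop nums x y := by
  unfold aLoop bLoop
  rw [loops_eq]

-- solve's per-query value, spelled from solve's own body (used only to factor the proofs below)
def aElem (nums : List Int) (q : List Int) : Int :=
  if q.getD 1 0 ≤ (isqrt nums.length : Int) + 1 then
    PySem.List.pyGetD (PySem.Dict.getD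
      ((PySem.List.pyRange 1 ((isqrt nums.length : Int) + 1 + 1) 1).foldl
        (fun d y => d.insert y (buildSuf nums y)) PySem.Dict.empty) (q.getD 1 0) []) (q.getD 0 0) 0
  else aLoop nums (q.getD 0 0) (q.getD 1 0)

theorem solve_eq_map (nums : List Int) (queries : List (List Int)) (hpre : Pre_solve nums queries) :
    solve nums queries = queries.map (aElem nums) := by
  show (queries.foldl (fun result q =>
      match q with
      | [x, y] =>
        if y ≤ (isqrt nums.length : Int) + 1 then
          result ++ [PySem.List.pyGetD (PySem.Dict.getD
            ((PySem.List.pyRange 1 ((isqrt nums.length : Int) + 1 + 1) 1).foldl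
              (fun d y => d.insert y (buildSuf nums y)) PySem.Dict.empty) y []) x 0]
        else result ++ [aLoop nums x y]
      | _ => result) []) = queries.map (aElem nums)
  have main : ∀ (qs : List (List Int)), (∀ q ∈ qs, q ∈ queries) → ∀ (acc : List Int),
      qs.foldl (fun result q =>
        match q with
        | [x, y] =>
          if y ≤ (isqrt nums.length : Int) + 1 then
            result ++ [PySem.List.pyGetD (PySem.Dict.getD
              ((PySem.List.pyRange 1 ((isqrt nums.length : Int) + 1 + 1) 1).foldl
                (fun d y => d.insert y (buildSuf nums y)) PySem.Dict.empty) y []) x 0]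
          else result ++ [aLoop nums x y]
        | _ => result) acc
      = acc ++ qs.map (aElem nums) := by
    intro qs
    induction qs with
    | nil => intro _ acc; simp
    | cons q qs ih =>
      intro hsub acc
      have hmem : q ∈ queries := hsub q List.mem_cons_self
      have hp := hpre q hmem
      obtain ⟨x, y, rfl⟩ : ∃ x y, q = [x, y] := by
        match q, hp with
        | [x, y], _ => exact ⟨x, y, rfl⟩
      rw [List.foldl_cons, List.map_cons, ih (fun p hp => hsub p (List.mem_cons_of_mem _ hp))]
      have hstep : (match [x, y] with
          | [x, y] =>
            if y ≤ (isqrt nums.length : Int) + 1 then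
              acc ++ [PySem.List.pyGetD (PySem.Dict.getD
                ((PySem.List.pyRange 1 ((isqrt nums.length : Int) + 1 + 1) 1).foldl
                  (fun d y => d.insert y (buildSuf nums y)) PySem.Dict.empty) y []) x 0]
            else acc ++ [aLoop nums x y]
          | _ => acc)
          = acc ++ [aElem nums [x, y]] := by
        simp only [aElem, List.getD_cons_zero, List.getD_cons_succ]
        split <;> rfl
      rw [hstep]
      simp
  exact main queries (fun q hq => hq) []

-- on a single-element chain (x+y past the end) A's table cell is the RAW nums[x]
theorem aCell_single (nums : List Int) (x y : Int) (hy : 1 ≤ y) (hx0 : 0 ≤ x)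
    (hxlt : x < (nums.length : Int)) (hxy : (nums.length : Int) ≤ x + y) :
    PySem.List.pyGetD (buildSuf nums y) x 0 = PySem.List.pyGetD nums x 0 := by
  obtain ⟨hblen, hbval⟩ := buildSuf_spec nums y hy
  have hxlt' : x < ((buildSuf nums y).length : Int) := by omega
  rw [PySem.List.pyGetD_eq_getElem (buildSuf nums y) 0 hx0 hxlt']
  have hx' : (x.toNat : Int) = x := by omega
  have hv : (buildSuf nums y)[x.toNat] = entryC nums y x := by
    have h := hbval x.toNat (by omega)
    rw [List.getD_eq_getElem?_getD, List.getElem?_eq_getElem (by omega), Option.getD_some] at h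
    rw [h, hx']
  rw [hv, entryC_unfold nums y hy x, if_pos hxlt, if_neg (by omega)]

-- and B reduces that one element mod 10^9+7
theorem bLoop_single (nums : List Int) (x y : Int) (hy : 1 ≤ y) (_hx0 : 0 ≤ x)
    (hxlt : x < (nums.length : Int)) (hxy : (nums.length : Int) ≤ x + y) :
    bLoop nums x y = PySem.Int.mod (PySem.List.pyGetD nums x 0) (1000000007 : Int) := by
  unfold bLoop
  rw [bLoopAux_spec nums y hy _ x 0 le_rfl, if_pos hxlt,
    entryC_unfold nums y hy x, if_pos hxlt, if_neg (by omega), zero_add]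

-- ===== VERDICT (by name: the statement is the Claim_ definition above) =====
theorem solve_spec : Claim_unchanged_solve := by
  intro nums queries hdom hpre hnd
  show solve nums queries = solve_alt nums queries
  have halt : solve_alt nums queries = queries.map (fun q =>
      if q.length = 2 then bLoop nums (q.getD 0 0) (q.getD 1 0) else (0 : Int)) := rfl
  rw [solve_eq_map nums queries hpre, halt]
  apply List.map_congr_left
  intro q hmem
  have hp := hpre q hmem
  obtain ⟨x, y, rfl⟩ : ∃ x y, q = [x, y] := by
    match q, hp with
    | [x, y], _ => exact ⟨x, y, rfl⟩
  simp only [List.getD_cons_zero, List.getD_cons_succ] at hp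
  obtain ⟨-, hy, hsmall, hlarge⟩ := hp
  simp only [aElem, List.getD_cons_zero, List.getD_cons_succ, List.length_cons,
    List.length_nil, if_true]
  by_cases hyt : y ≤ (isqrt nums.length : Int) + 1
  · rw [if_pos hyt]
    have hsq := (strideSmall_iff nums.length y hy).mp hyt
    obtain ⟨hx0, hxn⟩ := hsmall hsq
    rw [dict_fold_getD, if_pos (by rw [PySem.List.mem_pyRange_one]; omega)]
    apply smallQuery nums x y hy hx0 hxn
    intro hny hxlt
    by_contra hbad
    apply hnd
    refine ⟨[x, y], hmem, ?_⟩
    simp only [List.getD_cons_zero, List.getD_cons_succ, List.headD_cons]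
    refine ⟨hsq, by omega, ?_⟩
    have h0 : (0 : Int) ≤ nums.getD x.toNat 0 % 1000000007 := Int.emod_nonneg _ (by norm_num)
    have h1 : nums.getD x.toNat 0 % 1000000007 < 1000000007 := Int.emod_lt_of_pos _ (by norm_num)
    omega
  · rw [if_neg hyt, aLoop_eq_bLoop]

theorem solve_changed : Claim_changed_solve := by unfold Claim_changed_solve; decide

theorem solve_tight : Claim_exact_solve := by
  intro nums queries hdom hpre hd heq
  obtain ⟨q, hmem, hq⟩ := hd
  obtain ⟨hsq, hxy, hv⟩ := hq
  have hp := hpre q hmem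
  obtain ⟨x, y, rfl⟩ : ∃ x y, q = [x, y] := by
    match q, hp with
    | [x, y], _ => exact ⟨x, y, rfl⟩
  simp only [List.getD_cons_zero, List.getD_cons_succ] at hp
  obtain ⟨-, hy, hsmall, hlarge⟩ := hp
  simp only [List.getD_cons_zero, List.getD_cons_succ, List.headD_cons] at hsq hxy hv
  have hyt : y ≤ (isqrt nums.length : Int) + 1 := (strideSmall_iff nums.length y hy).mpr hsq
  obtain ⟨hx0, hxn⟩ := hsmall hsq
  have hv0 : nums.getD x.toNat 0 ≠ 0 := by
    intro h; rw [h] at hv; exact hv (by norm_num)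
  have hxlt : x < (nums.length : Int) := by
    by_contra hnx
    have hx : x = (nums.length : Int) := by omega
    apply hv0
    rw [List.getD_eq_getElem?_getD, List.getElem?_eq_none (by omega)]
    rfl
  have heq' : queries.map (aElem nums) = queries.map (fun q =>
      if q.length = 2 then bLoop nums (q.getD 0 0) (q.getD 1 0) else (0 : Int)) := by
    rw [← solve_eq_map nums queries hpre]; exact heq
  have he := List.map_inj_left.mp heq' [x, y] hmem
  simp only [aElem, List.getD_cons_zero, List.getD_cons_succ, List.length_cons,
    List.length_nil, if_true, if_pos hyt] at he
  rw [dict_fold_getD, if_pos (by rw [PySem.List.mem_pyRange_one]; omega),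
    aCell_single nums x y hy hx0 hxlt hxy, bLoop_single nums x y hy hx0 hxlt hxy] at he
  have hng : PySem.List.pyGetD nums x 0 = nums.getD x.toNat 0 := by
    rw [PySem.List.pyGetD_eq_getElem nums 0 hx0 hxlt, List.getD_eq_getElem?_getD,
      List.getElem?_eq_getElem (by omega), Option.getD_some]
  rw [hng, PySem.Int.mod_eq_emod_of_pos (by norm_num)] at he
  exact hv he.symm
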